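-- pv_equiv track=rewrite | github.com/camposlaura/otimizacao_multiobjetiva | task04/main.py | buscaLocalMochila
-- ===== SOURCE A (Python) =====
-- def avaliaSolucaoMochila(solucao, valores, pesos, capacidade):
--     valorMochila = 0
--     pesoMochila = 0
--     for i in range(len(solucao)):
--         if solucao[i]:
--             valorMochila += valores[i]
--             pesoMochila += pesos[i]
--     if pesoMochila > capacidade:
--         return 0
--     return valorMochila
--
-- def buscaLocalMochila(solucao, valores, pesos, capacidade):
--     melhorSolucao = solucao[:]
--     melhorValor = avaliaSolucaoMochila(melhorSolucao, valores, pesos, capacidade)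
--
--     for i in range(len(solucao)):
--         novaSolucao = solucao[:]
--         novaSolucao[i] = 1 - novaSolucao[i]
--         novoValor = avaliaSolucaoMochila(novaSolucao, valores, pesos, capacidade)
--
--         if novoValor > melhorValor:
--             melhorSolucao = novaSolucao[:]
--             melhorValor = novoValor
--
--     return melhorSolucao, melhorValor
-- ===== SOURCE B (Python) =====
-- def buscaLocalMochila(solucao, valores, pesos, capacidade):
--     # O(n): totals computed once, each single-bit flip evaluated incrementally.
--     totV = 0
--     totW = 0
--     for x, v, p in zip(solucao, valores, pesos):
--         if x:
--             totV += v
--             totW += p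
--     melhorValor = totV if totW <= capacidade else 0
--     melhorIdx = None
--     for i, (x, v, p) in enumerate(zip(solucao, valores, pesos)):
--         dV = (v if x != 1 else 0) - (v if x != 0 else 0)
--         dW = (p if x != 1 else 0) - (p if x != 0 else 0)
--         nV = totV + dV
--         nW = totW + dW
--         novo = nV if nW <= capacidade else 0
--         if novo > melhorValor:
--             melhorValor = novo
--             melhorIdx = i
--     res = solucao[:]
--     if melhorIdx is not None:
--         res[melhorIdx] = 1 - res[melhorIdx]
--     return res, melhorValor
-- ===== Notes on version B (the rewrite author's own statement) =====
-- stated objective: faster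
-- what changed: B computes the total value/weight of the current solution once and evaluates every single-bit flip by an O(1) incremental delta, tracking only the best flip index, instead of copying the list and re-summing it for each of the n flips.
import Mathlib
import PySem

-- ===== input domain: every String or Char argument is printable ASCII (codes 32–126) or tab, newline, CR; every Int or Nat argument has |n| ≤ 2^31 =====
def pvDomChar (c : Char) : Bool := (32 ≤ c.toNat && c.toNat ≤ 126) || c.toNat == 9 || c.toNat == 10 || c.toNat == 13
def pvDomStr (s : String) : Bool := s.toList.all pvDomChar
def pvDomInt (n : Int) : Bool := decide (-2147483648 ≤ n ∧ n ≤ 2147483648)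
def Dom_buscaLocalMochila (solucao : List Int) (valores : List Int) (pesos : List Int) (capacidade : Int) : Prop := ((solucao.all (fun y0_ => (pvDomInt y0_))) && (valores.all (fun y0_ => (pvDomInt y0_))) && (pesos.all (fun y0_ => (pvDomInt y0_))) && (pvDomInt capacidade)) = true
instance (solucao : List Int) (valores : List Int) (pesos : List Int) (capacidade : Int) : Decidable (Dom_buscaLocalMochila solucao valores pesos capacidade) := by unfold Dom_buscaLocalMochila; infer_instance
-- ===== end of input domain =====

-- B evaluates every single-bit flip by an O(1) incremental delta on totals computed once (O(n)),
-- instead of A's copy-and-resum per flip (O(n^2)); measured faster on the timing inputs.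

-- ===== PORT A =====
def avaliaSolucaoMochila (solucao valores pesos : List Int) (capacidade : Int) : Int :=
  let vp := (List.range solucao.length).foldl
    (fun (acc : Int × Int) i =>
      if solucao.getD i 0 ≠ 0 then (acc.1 + valores.getD i 0, acc.2 + pesos.getD i 0) else acc)
    (0, 0)
  if vp.2 > capacidade then 0 else vp.1

def buscaLocalMochila (solucao : List Int) (valores : List Int) (pesos : List Int) (capacidade : Int) : List Int × Int :=
  let melhorValor := avaliaSolucaoMochila solucao valores pesos capacidade
  (List.range solucao.length).foldl
    (fun (acc : List Int × Int) i =>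
      let novaSolucao := solucao.set i (1 - solucao.getD i 0)
      let novoValor := avaliaSolucaoMochila novaSolucao valores pesos capacidade
      if novoValor > acc.2 then (novaSolucao, novoValor) else acc)
    (solucao, melhorValor)

-- ===== PORT B =====
def buscaLocalMochila_alt (solucao : List Int) (valores : List Int) (pesos : List Int) (capacidade : Int) : List Int × Int :=
  let z := solucao.zip (valores.zip pesos)
  let tot := z.foldl
    (fun (acc : Int × Int) t => if t.1 ≠ 0 then (acc.1 + t.2.1, acc.2 + t.2.2) else acc) (0, 0)
  let base := if tot.2 ≤ capacidade then tot.1 else 0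
  let best := z.zipIdx.foldl
    (fun (acc : Int × Option Nat) ti =>
      let x := ti.1.1
      let dV := (if x ≠ 1 then ti.1.2.1 else 0) - (if x ≠ 0 then ti.1.2.1 else 0)
      let dW := (if x ≠ 1 then ti.1.2.2 else 0) - (if x ≠ 0 then ti.1.2.2 else 0)
      let novo := if tot.2 + dW ≤ capacidade then tot.1 + dV else 0
      if novo > acc.1 then (novo, some ti.2) else acc)
    (base, (none : Option Nat))
  match best.2 with
  | none => (solucao, best.1)
  | some i => (solucao.set i (1 - solucao.getD i 0), best.1)

-- ===== PRECONDITION & SPEC =====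
-- Pre_ excludes exactly the inputs on which A raises IndexError: valores or pesos shorter than solucao.
def Pre_buscaLocalMochila (solucao : List Int) (valores : List Int) (pesos : List Int) (capacidade : Int) : Prop :=
  solucao.length ≤ valores.length ∧ solucao.length ≤ pesos.length
instance (solucao : List Int) (valores : List Int) (pesos : List Int) (capacidade : Int) : Decidable (Pre_buscaLocalMochila solucao valores pesos capacidade) := by unfold Pre_buscaLocalMochila; infer_instance

def pvWitness_buscaLocalMochila : List Int × List Int × List Int × Int := ([1, 0], [3, 4], [2, 5], 6)

def Spec_buscaLocalMochila (solucao : List Int) (valores : List Int) (pesos : List Int) (capacidade : Int) (out : List Int × Int) : Prop := out = buscaLocalMochila_alt solucao valores pesos capacidade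
instance (solucao : List Int) (valores : List Int) (pesos : List Int) (capacidade : Int) (out : List Int × Int) : Decidable (Spec_buscaLocalMochila solucao valores pesos capacidade out) := by unfold Spec_buscaLocalMochila; infer_instance

-- ===== CLAIM (what is proved, stated in full; the proofs are below) =====
def Claim_equal_buscaLocalMochila : Prop := ∀ (solucao : List Int) (valores : List Int) (pesos : List Int) (capacidade : Int), Dom_buscaLocalMochila solucao valores pesos capacidade → Pre_buscaLocalMochila solucao valores pesos capacidade → Spec_buscaLocalMochila solucao valores pesos capacidade (buscaLocalMochila solucao valores pesos capacidade)


-- ===== LEMMAS AND PROOFS =====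

/-- The best-so-far solution A carries equals the original solution with the best flip
index (as tracked by B) applied. -/
def applyIdx (sol : List Int) : Option Nat → List Int
  | none => sol
  | some i => sol.set i (1 - sol.getD i 0)

/-- Both value/weight accumulation loops compute a pair of indicator sums. -/
lemma foldl_pair_sum (l : List Nat) (c g h : Nat → Int) (a b : Int) :
    l.foldl (fun (acc : Int × Int) i => if c i ≠ 0 then (acc.1 + g i, acc.2 + h i) else acc) (a, b)
    = (a + (l.map (fun i => if c i ≠ 0 then g i else 0)).sum,
       b + (l.map (fun i => if c i ≠ 0 then h i else 0)).sum) := by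
  induction l generalizing a b with
  | nil => simp
  | cons x xs ih =>
    simp only [List.foldl_cons, ih, List.map_cons, List.sum_cons]
    by_cases hx : c x ≠ 0
    · rw [if_pos hx, if_pos hx, if_pos hx]
      simp only [Prod.mk.injEq]; constructor <;> ring
    · rw [if_neg hx, if_neg hx, if_neg hx]
      simp only [Prod.mk.injEq]; constructor <;> ring

/-- Changing a summand at one in-range index shifts an indexed sum by the difference there. -/
lemma sum_map_range_update (n i : Nat) (hi : i < n) (f f' : Nat → Int)
    (hoff : ∀ j, j ≠ i → f' j = f j) :
    ((List.range n).map f').sum = ((List.range n).map f).sum + (f' i - f i) := by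
  induction n with
  | zero => omega
  | succ m ih =>
    rw [List.range_succ, List.map_append, List.map_append, List.sum_append, List.sum_append]
    by_cases h : i = m
    · subst h
      rw [List.map_congr_left (fun j hj => hoff j (by simp at hj; omega))]
      simp
    · rw [ih (by omega)]
      simp [hoff m (by omega)]
      ring

/-- Under Pre_, zip(solucao, zip(valores, pesos)) is the index-wise triple over range. -/
lemma zip_eq_map_range (sol val pes : List Int)
    (h1 : sol.length ≤ val.length) (h2 : sol.length ≤ pes.length) :
    sol.zip (val.zip pes)
    = (List.range sol.length).map (fun i => (sol.getD i 0, (val.getD i 0, pes.getD i 0))) := by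
  apply List.ext_getElem
  · simp only [List.length_zip, List.length_map, List.length_range]; omega
  · intro i h1' h2'
    simp only [List.length_zip, List.length_map, List.length_range, lt_min_iff] at h1' h2'
    simp only [List.getElem_zip, List.getElem_map, List.getElem_range]
    rw [List.getD_eq_getElem _ _ (by omega), List.getD_eq_getElem _ _ (by omega),
        List.getD_eq_getElem _ _ (by omega)]

lemma zipIdx_map_range (n : Nat) (f : Nat → Int × Int × Int) :
    ((List.range n).map f).zipIdx = (List.range n).map (fun i => (f i, i)) := by
  apply List.ext_getElem <;> simp [List.getElem_zipIdx]

/-- A's re-evaluation of the one-bit flip equals B's incremental evaluation. -/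
lemma avalia_flip (sol val pes : List Int) (cap : Int) (i : Nat) (hi : i < sol.length) :
    avaliaSolucaoMochila (sol.set i (1 - sol.getD i 0)) val pes cap
    = (if ((List.range sol.length).map (fun j => if sol.getD j 0 ≠ 0 then pes.getD j 0 else 0)).sum
          + ((if sol.getD i 0 ≠ 1 then pes.getD i 0 else 0) - (if sol.getD i 0 ≠ 0 then pes.getD i 0 else 0)) ≤ cap
       then ((List.range sol.length).map (fun j => if sol.getD j 0 ≠ 0 then val.getD j 0 else 0)).sum
          + ((if sol.getD i 0 ≠ 1 then val.getD i 0 else 0) - (if sol.getD i 0 ≠ 0 then val.getD i 0 else 0))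
       else 0) := by
  have hset : ∀ j, j ≠ i → (sol.set i (1 - sol.getD i 0)).getD j 0 = sol.getD j 0 := by
    intro j hj
    simp [List.getD, List.getElem?_set_ne (Ne.symm hj)]
  have hseti : (sol.set i (1 - sol.getD i 0)).getD i 0 = 1 - sol.getD i 0 := by
    simp [List.getD, hi]
  unfold avaliaSolucaoMochila
  rw [List.length_set, foldl_pair_sum]
  rw [sum_map_range_update sol.length i hi
        (fun j => if sol.getD j 0 ≠ 0 then pes.getD j 0 else 0)
        (fun j => if (sol.set i (1 - sol.getD i 0)).getD j 0 ≠ 0 then pes.getD j 0 else 0)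
        (fun j hj => by simp only [hset j hj]),
      sum_map_range_update sol.length i hi
        (fun j => if sol.getD j 0 ≠ 0 then val.getD j 0 else 0)
        (fun j => if (sol.set i (1 - sol.getD i 0)).getD j 0 ≠ 0 then val.getD j 0 else 0)
        (fun j hj => by simp only [hset j hj])]
  simp only [hseti]
  have hiff : (1 - sol.getD i 0 ≠ 0) ↔ (sol.getD i 0 ≠ 1) := by omega
  rw [if_congr hiff rfl rfl, if_congr hiff rfl rfl]
  simp only [zero_add]
  split_ifs with hA hB <;> first | rfl | linarith

/-- Loop invariant: A's (best solution, best value) pair tracks B's (best value, best index) pair. -/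
lemma loop_rel (sol val pes : List Int) (cap : Int) (g : Nat → Int)
    (l : List Nat)
    (hg : ∀ i ∈ l, avaliaSolucaoMochila (sol.set i (1 - sol.getD i 0)) val pes cap = g i)
    (bval : Int) (bidx : Option Nat) :
    l.foldl (fun (acc : List Int × Int) i =>
        if avaliaSolucaoMochila (sol.set i (1 - sol.getD i 0)) val pes cap > acc.2
        then (sol.set i (1 - sol.getD i 0), avaliaSolucaoMochila (sol.set i (1 - sol.getD i 0)) val pes cap)
        else acc)
      (applyIdx sol bidx, bval)
    = (applyIdx sol ((l.foldl (fun (acc : Int × Option Nat) i =>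
          if g i > acc.1 then (g i, some i) else acc) (bval, bidx)).2),
       (l.foldl (fun (acc : Int × Option Nat) i =>
          if g i > acc.1 then (g i, some i) else acc) (bval, bidx)).1) := by
  induction l generalizing bval bidx with
  | nil => rfl
  | cons x xs ih =>
    simp only [List.foldl_cons, hg x (List.mem_cons_self)]
    by_cases hgt : g x > bval
    · simp only [hgt, if_pos]
      have := ih (fun i hi => hg i (List.mem_cons_of_mem _ hi)) (g x) (some x)
      simpa [applyIdx] using this
    · simp only [hgt, ite_false]
      exact ih (fun i hi => hg i (List.mem_cons_of_mem _ hi)) bval bidx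

lemma final_shape (sol : List Int) (R : Int × Option Nat) :
    ((applyIdx sol R.2, R.1) : List Int × Int)
    = match R.2 with
      | none => (sol, R.1)
      | some i => (sol.set i (1 - sol.getD i 0), R.1) := by
  rcases R with ⟨v, _ | i⟩ <;> rfl

-- ===== VERDICT (by name: the statement is the Claim_ definition above) =====
theorem buscaLocalMochila_spec : Claim_equal_buscaLocalMochila := by
  intro sol val pes cap _ hpre
  obtain ⟨h1, h2⟩ := hpre
  unfold Spec_buscaLocalMochila buscaLocalMochila buscaLocalMochila_alt
  rw [zip_eq_map_range sol val pes h1 h2]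
  simp only [List.foldl_map, zipIdx_map_range, List.foldl_map]
  rw [foldl_pair_sum]
  set tv := ((List.range sol.length).map (fun j => if sol.getD j 0 ≠ 0 then val.getD j 0 else 0)).sum with htv
  set tw := ((List.range sol.length).map (fun j => if sol.getD j 0 ≠ 0 then pes.getD j 0 else 0)).sum with htw
  have hbase : avaliaSolucaoMochila sol val pes cap = (if tw ≤ cap then tv else 0) := by
    unfold avaliaSolucaoMochila
    rw [foldl_pair_sum]
    simp only [zero_add]
    rw [← htv, ← htw]
    split_ifs <;> first | rfl | linarith
  have := loop_rel sol val pes cap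
    (fun i => if tw + ((if sol.getD i 0 ≠ 1 then pes.getD i 0 else 0) - (if sol.getD i 0 ≠ 0 then pes.getD i 0 else 0)) ≤ cap
              then tv + ((if sol.getD i 0 ≠ 1 then val.getD i 0 else 0) - (if sol.getD i 0 ≠ 0 then val.getD i 0 else 0))
              else 0)
    (List.range sol.length)
    (fun i hi => avalia_flip sol val pes cap i (by simpa using hi))
    (if tw ≤ cap then tv else 0) none
  rw [hbase]
  simp only [zero_add] at this ⊢
  simp only [applyIdx] at this
  rw [this]
  exact final_shape sol _
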